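-- pv_equiv track=rewrite | github.com/jcolinpatrick/kryptos | scripts/transposition/other/blitz_strip_cipher.py | autokey_beau_decrypt
-- ===== SOURCE A (Python) =====
-- def autokey_beau_decrypt(ct: str, primer: str, alpha: str) -> str:
--     """Beaufort autokey: key = primer + plaintext."""
--     pt = []
--     key = list(primer.upper())
--     for i, c in enumerate(ct):
--         ki = alpha.index(key[i])
--         ci = alpha.index(c)
--         p = alpha[(ki - ci) % 26]
--         pt.append(p)
--         key.append(p)
--     return "".join(pt)
-- ===== SOURCE B (Python) =====
-- def autokey_beau_decrypt(ct: str, primer: str, alpha: str) -> str: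
--     """Beaufort autokey, decrypted block by block: each block of len(primer)
--     ciphertext characters is decrypted against the previous plaintext block
--     (the first against the uppercased primer), so no growing key buffer and
--     no per-character bookkeeping index is needed."""
--     out = []
--     key = list(primer.upper())
--     pos = 0
--     while pos < len(ct) and key:
--         chunk = ct[pos:pos + len(key)]
--         key = [alpha[(alpha.index(k) - alpha.index(c)) % 26] for k, c in zip(key, chunk)]
--         out += key
--         pos += len(chunk)
--     return "".join(out)
-- ===== Notes on version B (the rewrite author's own statement) =====
-- stated objective: alternative
-- what changed: Replaces A's per-character loop with a growing parallel key buffer by a block-wise scheme: the ciphertext is consumed in chunks of len(primer) and each chunk is decrypted by zipping it against the previous plaintext block (initially the uppercased primer), so no key buffer and no character counter exist.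
-- outside the precondition, e.g. on autokey_beau_decrypt('A', 'B', 'AB'): A returns 'B', B returns 'B'
import Mathlib
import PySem

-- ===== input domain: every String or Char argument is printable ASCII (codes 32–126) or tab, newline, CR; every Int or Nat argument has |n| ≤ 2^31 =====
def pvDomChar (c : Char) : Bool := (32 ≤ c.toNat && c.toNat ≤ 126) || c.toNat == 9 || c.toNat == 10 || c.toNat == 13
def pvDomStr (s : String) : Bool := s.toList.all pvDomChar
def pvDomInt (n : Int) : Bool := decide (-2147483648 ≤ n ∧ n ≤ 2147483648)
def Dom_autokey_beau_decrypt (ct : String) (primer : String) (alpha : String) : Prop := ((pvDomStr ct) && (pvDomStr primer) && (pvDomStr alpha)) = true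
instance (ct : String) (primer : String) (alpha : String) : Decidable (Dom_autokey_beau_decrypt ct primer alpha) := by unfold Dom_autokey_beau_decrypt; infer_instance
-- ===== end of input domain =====

-- B trades A's per-character loop with a growing key buffer for a block-wise scheme:
-- the ciphertext is consumed in chunks of len(primer), each chunk decrypted against
-- the previous plaintext block (objective: alternative decomposition, same cost).

-- ===== PORT A =====
-- str.index of a single character: index of its first occurrence (Pre_ guarantees presence).
def pvIdx (al : List Char) (c : Char) : Int := (((PySem.List.index? al c).getD 0 : Nat) : Int)

-- one Beaufort step: alpha[(alpha.index(k) - alpha.index(c)) % 26] (shared by both ports)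
def pvStep (al : List Char) (k c : Char) : Char :=
  (PySem.List.pyGet? al (PySem.Int.mod (pvIdx al k - pvIdx al c) 26)).getD ' '

-- the for-loop of A, carrying (i, pt, key); key[i] via getD (Pre_ keeps i in range)
def pvGoA (al : List Char) (cs : List Char) (i : Nat) (pt : List Char) (key : List Char) : List Char :=
  match cs with
  | [] => pt
  | c :: rest =>
      let p := pvStep al (key.getD i ' ') c
      pvGoA al rest (i + 1) (pt ++ [p]) (key ++ [p])

def autokey_beau_decrypt (ct : String) (primer : String) (alpha : String) : String :=
  String.ofList (pvGoA alpha.toList ct.toList 0 [] (PySem.Chars.upper primer.toList))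

-- ===== PORT B =====
-- the while-loop of B: recursion on the remaining ciphertext; `key` is the previous
-- plaintext block (initially the uppercased primer); each round decrypts one chunk.
def pvGoB (al : List Char) (key : List Char) (rest : List Char) : List Char :=
  if rest.isEmpty || key.isEmpty then []
  else
    let chunk := rest.take key.length
    let nb := (key.zip chunk).map (fun kc => pvStep al kc.1 kc.2)
    nb ++ pvGoB al nb (rest.drop key.length)
termination_by rest.length
decreasing_by
  simp_all [List.isEmpty_iff]
  have hk : 0 < key.length := List.length_pos_of_ne_nil (by tauto)
  have hr : 0 < rest.length := List.length_pos_of_ne_nil (by tauto)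
  omega

def autokey_beau_decrypt_alt (ct : String) (primer : String) (alpha : String) : String :=
  String.ofList (pvGoB alpha.toList (PySem.Chars.upper primer.toList) ct.toList)

-- ===== PRECONDITION & SPEC =====
-- For empty ct A returns "" unconditionally. Otherwise A raises ValueError when a consulted
-- character (a ct character, or one of the first len(ct) characters of primer.upper()) is not
-- in alpha, and IndexError on an empty primer. Pre_ also requires len(alpha) ≥ 26: on shorter alphabets A may raise
-- IndexError at alpha[(ki-ci)%26] depending on the computed indices, a condition with no
-- closed form — this excludes some inputs on which A still returns (see the cite in claim.json).
def Pre_autokey_beau_decrypt (ct : String) (primer : String) (alpha : String) : Prop :=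
  ct.toList.isEmpty = true ∨
  (primer.toList.isEmpty = false ∧
   26 ≤ alpha.toList.length ∧
   ct.toList.all (fun c => alpha.toList.contains c) = true ∧
   ((PySem.Chars.upper primer.toList).take ct.toList.length).all (fun c => alpha.toList.contains c) = true)
instance (ct : String) (primer : String) (alpha : String) : Decidable (Pre_autokey_beau_decrypt ct primer alpha) := by unfold Pre_autokey_beau_decrypt; infer_instance

def pvWitness_autokey_beau_decrypt : String × String × String :=
  ("HI", "K", "ABCDEFGHIJKLMNOPQRSTUVWXYZ")

def Spec_autokey_beau_decrypt (ct : String) (primer : String) (alpha : String) (out : String) : Prop := out = autokey_beau_decrypt_alt ct primer alpha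
instance (ct : String) (primer : String) (alpha : String) (out : String) : Decidable (Spec_autokey_beau_decrypt ct primer alpha out) := by unfold Spec_autokey_beau_decrypt; infer_instance

-- ===== CLAIM (what is proved, stated in full; the proofs are below) =====
def Claim_equal_autokey_beau_decrypt : Prop := ∀ (ct : String) (primer : String) (alpha : String), Dom_autokey_beau_decrypt ct primer alpha → Pre_autokey_beau_decrypt ct primer alpha → Spec_autokey_beau_decrypt ct primer alpha (autokey_beau_decrypt ct primer alpha)

-- ===== LEMMAS AND PROOFS =====

-- common characterisation: char-wise autokey with a rotating key queue
-- (consume from the front, append the produced plaintext char at the back)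
def pvChain (al : List Char) (key : List Char) (rest : List Char) : List Char :=
  match rest with
  | [] => []
  | c :: cs =>
      match key with
      | [] => []
      | k :: ks =>
          let p := pvStep al k c
          p :: pvChain al (ks ++ [p]) cs

-- A's loop equals the chain on the queue key.drop i (invariant: i stays in range)
lemma pvGoA_eq_chain (al : List Char) :
    ∀ (cs : List Char) (i : Nat) (pt key : List Char), (cs = [] ∨ i < key.length) →
      pvGoA al cs i pt key = pt ++ pvChain al (key.drop i) cs := by
  intro cs
  induction cs with
  | nil => intro i pt key _; simp [pvGoA, pvChain]
  | cons c rest ih =>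
      intro i pt key h
      have hi : i < key.length := by
        rcases h with h | h
        · exact absurd h (by simp)
        · exact h
      have hdrop : key.drop i = key[i] :: key.drop (i + 1) :=
        List.drop_eq_getElem_cons hi
      have hgetD : key.getD i ' ' = key[i] := by
        simp [List.getD, List.getElem?_eq_getElem hi]
      have hdropApp : (key ++ [pvStep al key[i] c]).drop (i + 1) =
          key.drop (i + 1) ++ [pvStep al key[i] c] :=
        List.drop_append_of_le_length (by omega)
      have hrec := ih (i + 1) (pt ++ [pvStep al key[i] c]) (key ++ [pvStep al key[i] c])
        (Or.inr (by simp; omega))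
      simp only [pvGoA, hgetD]
      rw [hrec, hdrop, hdropApp]
      simp [pvChain]
  -- invariant: A's key list viewed from position i is exactly the chain's queue

-- zipping with a take to the left list's length changes nothing
lemma pvZip_take (key : List Char) : ∀ (r : List Char), key.zip (r.take key.length) = key.zip r := by
  induction key with
  | nil => intro r; simp
  | cons k ks ih =>
      intro r
      cases r with
      | nil => simp
      | cons c cs =>
          simp only [List.zip, List.length_cons, List.take_succ_cons, List.zipWith_cons_cons]
          exact congrArg _ (ih cs)

-- the chain processes one whole block at a time: after consuming k.length characters
-- the queue is acc followed by exactly the produced block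
lemma pvChain_block (al : List Char) :
    ∀ (k rest acc : List Char),
      pvChain al (k ++ acc) rest =
        (k.zip rest).map (fun kc => pvStep al kc.1 kc.2) ++
          pvChain al (acc ++ (k.zip rest).map (fun kc => pvStep al kc.1 kc.2)) (rest.drop k.length) := by
  intro k
  induction k with
  | nil => intro rest acc; simp
  | cons kk ks ih =>
      intro rest acc
      cases rest with
      | nil => simp [pvChain]
      | cons c cs =>
          simp only [List.cons_append, pvChain, List.zip_cons_cons, List.map_cons,
            List.length_cons, List.drop_succ_cons]
          rw [show ks ++ acc ++ [pvStep al kk c] = ks ++ (acc ++ [pvStep al kk c]) from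
            List.append_assoc _ _ _, ih cs (acc ++ [pvStep al kk c])]
          simp

-- unfolding equations for the well-founded pvGoB
lemma pvGoB_nil_rest (al key : List Char) : pvGoB al key [] = [] := by
  rw [pvGoB.eq_def]; simp

lemma pvGoB_nil_key (al rest : List Char) : pvGoB al [] rest = [] := by
  rw [pvGoB.eq_def]; simp

lemma pvGoB_cons (al key rest : List Char) (hk : key ≠ []) (hr : rest ≠ []) :
    pvGoB al key rest =
      (key.zip (rest.take key.length)).map (fun kc => pvStep al kc.1 kc.2) ++
        pvGoB al ((key.zip (rest.take key.length)).map (fun kc => pvStep al kc.1 kc.2))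
          (rest.drop key.length) := by
  rw [pvGoB.eq_def]
  simp [List.isEmpty_iff, hk, hr]

-- B's block loop equals the chain
lemma pvGoB_eq_chain (al : List Char) :
    ∀ (n : Nat) (key rest : List Char), rest.length ≤ n →
      pvGoB al key rest = pvChain al key rest := by
  intro n
  induction n with
  | zero =>
      intro key rest h
      have : rest = [] := by cases rest <;> simp_all
      subst this; simp [pvGoB_nil_rest, pvChain]
  | succ m ih =>
      intro key rest h
      by_cases hr : rest = []
      · subst hr; simp [pvGoB_nil_rest, pvChain]
      by_cases hk : key = []
      · subst hk
        cases rest with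
        | nil => simp [pvGoB_nil_rest, pvChain]
        | cons c cs => simp [pvGoB_nil_key, pvChain]
      · rw [pvGoB_cons al key rest hk hr, pvZip_take]
        have hlt : (rest.drop key.length).length ≤ m := by
          have h1 : 0 < key.length := List.length_pos_of_ne_nil hk
          have h2 : 0 < rest.length := List.length_pos_of_ne_nil hr
          simp only [List.length_drop]; omega
        rw [ih _ _ hlt]
        have := pvChain_block al key rest []
        simpa using this.symm

-- ===== VERDICT (by name: the statement is the Claim_ definition above) =====
theorem autokey_beau_decrypt_spec : Claim_equal_autokey_beau_decrypt := by
  intro ct primer alpha _ hpre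
  unfold Spec_autokey_beau_decrypt autokey_beau_decrypt autokey_beau_decrypt_alt
  have hB := pvGoB_eq_chain alpha.toList ct.toList.length (PySem.Chars.upper primer.toList) ct.toList le_rfl
  have hcond : ct.toList = [] ∨ 0 < (PySem.Chars.upper primer.toList).length := by
    rcases hpre with h | h
    · left; simpa [List.isEmpty_iff] using h
    · right
      have hne : primer.toList ≠ [] := by simpa [List.isEmpty_iff] using h.1
      cases hres : primer.toList with
      | nil => exact absurd hres hne
      | cons a l => simp [PySem.Chars.upper]
  have hA := pvGoA_eq_chain alpha.toList ct.toList 0 [] (PySem.Chars.upper primer.toList) hcond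
  rw [hA, hB]
  simp
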